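-- pv_equiv track=rewrite | github.com/HashTag42/AdventOfCode | 2015/2015-17/AoC_2015_17.py | find_min_containers
-- ===== SOURCE A (Python) =====
-- from itertools import combinations
--
-- EGGNOG = 150
--
-- def find_min_containers(containers: list[int], target: int = EGGNOG) -> int:
--     containers = sorted(containers, reverse=True)
--     min_containers = 0
--     found = False
--     for i in range(len(containers)):
--         for combination in combinations(containers, i):
--             if sum(combination) == target:
--                 min_containers = i
--                 found = True
--                 break
--         if found:
--             break
--     return min_containers
-- ===== SOURCE B (Python) =====
-- EGGNOG = 150
--
-- def find_min_containers(containers: list[int], target: int = EGGNOG) -> int: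
--     # Subset-sum DP: best[s] = minimum number of containers achieving sum s.
--     best = {0: 0}
--     for x in containers:
--         for s, c in list(best.items()):
--             ns = s + x
--             if ns not in best or best[ns] > c + 1:
--                 best[ns] = c + 1
--     return best.get(target, 0)
-- ===== Notes on version B (the rewrite author's own statement) =====
-- stated objective: faster
-- what changed: Replaced brute-force enumeration of all combinations of every size with a subset-sum dynamic program keeping, per achievable sum, the minimum number of containers.
-- intended difference: On inputs where the whole list is the only subset summing to target (A's range(len(containers)) never tries size n), A returns 0 while B returns n, the intended minimal container count. — e.g. on find_min_containers([1, 2], 3): A returns 0, B returns 2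
import Mathlib
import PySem

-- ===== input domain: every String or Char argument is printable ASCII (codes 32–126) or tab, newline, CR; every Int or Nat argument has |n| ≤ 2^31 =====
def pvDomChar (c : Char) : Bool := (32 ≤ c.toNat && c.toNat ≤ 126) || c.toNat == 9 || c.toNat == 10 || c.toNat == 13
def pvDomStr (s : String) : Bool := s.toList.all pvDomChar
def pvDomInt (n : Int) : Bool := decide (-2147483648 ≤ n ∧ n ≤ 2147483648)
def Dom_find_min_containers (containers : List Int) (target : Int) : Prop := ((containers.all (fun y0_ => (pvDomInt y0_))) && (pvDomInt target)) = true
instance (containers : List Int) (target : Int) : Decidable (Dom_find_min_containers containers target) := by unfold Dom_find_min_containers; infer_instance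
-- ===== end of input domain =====

-- B replaces A's exponential enumeration of combinations by a subset-sum DP (min count per
-- achievable sum); A never tries the size-n combination, so on inputs whose ONLY solution is the
-- full set A returns 0 while B returns n — stated below as the intended difference D_.


-- ===== PORT A =====
-- itertools.combinations(xs, k): all length-k subsequences of xs, first-element combinations first
def pvCombos : List Int → Nat → List (List Int)
  | _, 0 => [[]]
  | [], _ + 1 => []
  | x :: xs, k + 1 => (pvCombos xs k).map (fun c => x :: c) ++ pvCombos xs (k + 1)

-- 'for i in range(len(containers))' with the found/break early exit; rem = iterations left
def pvLoopA (cs : List Int) (target : Int) : Nat → Nat → Int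
  | _, 0 => 0
  | i, rem + 1 =>
    if (pvCombos cs i).any (fun c => c.sum == target) then (i : Int)
    else pvLoopA cs target (i + 1) rem

def find_min_containers (containers : List Int) (target : Int) : Int :=
  let cs := PySem.List.sorted containers (fun x => x) true
  pvLoopA cs target 0 cs.length

-- ===== PORT B =====
-- one snapshot item (s, c): ns = s + x; if ns not in best or best[ns] > c + 1: best[ns] = c + 1
def pvStep (x : Int) (d : PySem.Dict Int Int) (p : Int × Int) : PySem.Dict Int Int :=
  match d.get? (p.1 + x) with
  | none => d.insert (p.1 + x) (p.2 + 1)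
  | some v => if v > p.2 + 1 then d.insert (p.1 + x) (p.2 + 1) else d

def find_min_containers_alt (containers : List Int) (target : Int) : Int :=
  let best := containers.foldl (fun d x => d.items.foldl (pvStep x) d) (PySem.Dict.empty.insert 0 0)
  best.getD target 0

-- ===== PRECONDITION & SPEC =====
-- A's range(len(containers)) never tries the size-n combination: when the whole list is the only
-- subset summing to target, A returns 0 while B returns n (the number of containers), the
-- intended minimal count.
def D_find_min_containers (containers : List Int) (target : Int) : Prop :=
  containers ≠ [] ∧ containers.sum = target ∧
    ∀ l ∈ containers.sublists, l.length < containers.length → l.sum ≠ target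
instance (containers : List Int) (target : Int) : Decidable (D_find_min_containers containers target) := by
  unfold D_find_min_containers; infer_instance

def Spec_find_min_containers (containers : List Int) (target : Int) (out : Int) : Prop :=
  ¬ D_find_min_containers containers target → out = find_min_containers_alt containers target
instance (containers : List Int) (target : Int) (out : Int) : Decidable (Spec_find_min_containers containers target out) := by
  unfold Spec_find_min_containers; infer_instance

def pvDiffWitness_find_min_containers : List Int × Int := ([1, 2], 3)
def pvDiffWitnessOut_find_min_containers : Int × Int := (0, 2)

-- ===== CLAIM (what is proved, stated in full; the proofs are below) =====
def Claim_unchanged_find_min_containers : Prop := ∀ (containers : List Int) (target : Int), Dom_find_min_containers containers target → Spec_find_min_containers containers target (find_min_containers containers target)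
def Claim_changed_find_min_containers : Prop := Dom_find_min_containers (pvDiffWitness_find_min_containers.1) (pvDiffWitness_find_min_containers.2) ∧ D_find_min_containers (pvDiffWitness_find_min_containers.1) (pvDiffWitness_find_min_containers.2) ∧ find_min_containers (pvDiffWitness_find_min_containers.1) (pvDiffWitness_find_min_containers.2) = pvDiffWitnessOut_find_min_containers.1 ∧ find_min_containers_alt (pvDiffWitness_find_min_containers.1) (pvDiffWitness_find_min_containers.2) = pvDiffWitnessOut_find_min_containers.2 ∧ pvDiffWitnessOut_find_min_containers.1 ≠ pvDiffWitnessOut_find_min_containers.2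
def Claim_exact_find_min_containers : Prop := ∀ (containers : List Int) (target : Int), Dom_find_min_containers containers target → D_find_min_containers containers target → find_min_containers containers target ≠ find_min_containers_alt containers target

-- ===== LEMMAS AND PROOFS =====

-- minimum over two optional Nats (none = +∞)
def pvOMin : Option Nat → Option Nat → Option Nat
  | none, b => b
  | some a, none => some a
  | some a, some b => some (min a b)

-- same for Int values
def pvOMinI : Option Int → Option Int → Option Int
  | none, b => b
  | some a, none => some a
  | some a, some b => some (min a b)

-- spec: minimal length of a sublist of xs summing to s
def pvMinLen : List Int → Int → Option Nat
  | [], s => if s = 0 then some 0 else none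
  | x :: xs, s => pvOMin (pvMinLen xs s) ((pvMinLen xs (s - x)).map (· + 1))

theorem pvOMin_none_left (b : Option Nat) : pvOMin none b = b := rfl
theorem pvOMinI_none_left (b : Option Int) : pvOMinI none b = b := rfl
theorem pvOMinI_none_right (a : Option Int) : pvOMinI a none = a := by cases a <;> rfl
theorem pvOMinI_some_some (a b : Int) : pvOMinI (some a) (some b) = some (min a b) := rfl

theorem pvMinLen_cons (x : Int) (xs : List Int) (s : Int) :
    pvMinLen (x :: xs) s = pvOMin (pvMinLen xs s) ((pvMinLen xs (s - x)).map (· + 1)) := rfl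

theorem pvOMin_swap (a b c d : Option Nat) :
    pvOMin (pvOMin a b) (pvOMin c d) = pvOMin (pvOMin a c) (pvOMin b d) := by
  cases a <;> cases b <;> cases c <;> cases d <;> simp [pvOMin] <;> omega

theorem pvOMin_map_succ (a b : Option Nat) :
    (pvOMin a b).map (· + 1) = pvOMin (a.map (· + 1)) (b.map (· + 1)) := by
  cases a <;> cases b <;> simp [pvOMin]

theorem pvOMin_eq_none (a b : Option Nat) : pvOMin a b = none ↔ a = none ∧ b = none := by
  cases a <;> cases b <;> simp [pvOMin]

theorem pvOMinI_assoc (a b c : Option Int) :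
    pvOMinI (pvOMinI a b) c = pvOMinI a (pvOMinI b c) := by
  cases a <;> cases b <;> cases c <;> simp [pvOMinI, min_assoc]

theorem pvOMin_cast (a b : Option Nat) :
    (pvOMin a b).map (fun k => (k : Int)) = pvOMinI (a.map (fun k => (k : Int))) (b.map (fun k => (k : Int))) := by
  cases a <;> cases b <;> simp [pvOMin, pvOMinI]

theorem pvMinLen_snoc (xs : List Int) (x : Int) : ∀ t,
    pvMinLen (xs ++ [x]) t = pvOMin (pvMinLen xs t) ((pvMinLen xs (t - x)).map (· + 1)) := by
  induction xs with
  | nil => intro t; rfl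
  | cons y xs ih =>
    intro t
    show pvOMin (pvMinLen (xs ++ [x]) t) ((pvMinLen (xs ++ [x]) (t - y)).map (· + 1)) = _
    rw [ih t, ih (t - y), pvMinLen_cons, pvMinLen_cons]
    rw [pvOMin_map_succ, pvOMin_map_succ, pvOMin_swap]
    rw [show t - y - x = t - x - y by ring]

-- (1) none ↔ no sublist sums to s
theorem pvMinLen_eq_none (xs : List Int) : ∀ s,
    pvMinLen xs s = none ↔ ∀ l, List.Sublist l xs → l.sum ≠ s := by
  induction xs with
  | nil =>
    intro s
    by_cases hs : s = 0
    · subst hs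
      constructor
      · intro h; simp [pvMinLen] at h
      · intro h; exact ((h [] (List.Sublist.refl _)) (by simp)).elim
    · constructor
      · intro _ l hl hls
        rcases List.sublist_nil.mp hl with rfl
        exact hs (by simpa using hls.symm)
      · intro _; simp [pvMinLen, hs]
  | cons x xs ih =>
    intro s
    constructor
    · intro h l hl hs
      rw [pvMinLen_cons, pvOMin_eq_none] at h
      have h1 : pvMinLen xs s = none := h.1
      have h2 : pvMinLen xs (s - x) = none := by
        cases hmm : pvMinLen xs (s - x) with
        | none => rfl
        | some m => rw [hmm] at h; simp at h
      rcases List.sublist_cons_iff.mp hl with hl' | ⟨r, rfl, hr⟩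
      · exact (ih s).mp h1 l hl' hs
      · have : r.sum = s - x := by simp only [List.sum_cons] at hs; omega
        exact (ih (s - x)).mp h2 r hr this
    · intro h
      have h1 : pvMinLen xs s = none :=
        (ih s).mpr (fun l hl => h l (hl.trans (List.sublist_cons_self x xs)))
      have h2 : pvMinLen xs (s - x) = none := by
        refine (ih (s - x)).mpr (fun l hl hls => ?_)
        exact h (x :: l) (List.cons_sublist_cons.mpr hl)
          (by simp only [List.sum_cons, hls]; omega)
      rw [pvMinLen_cons, h1, h2]; rfl

-- (2) some k → a witness sublist of length k summing to s
theorem pvMinLen_eq_some_exists (xs : List Int) : ∀ s k,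
    pvMinLen xs s = some k → ∃ l, List.Sublist l xs ∧ l.length = k ∧ l.sum = s := by
  induction xs with
  | nil =>
    intro s k h
    simp [pvMinLen] at h
    rcases h with ⟨rfl, rfl⟩
    exact ⟨[], List.Sublist.refl _, rfl, rfl⟩
  | cons x xs ih =>
    intro s k h
    rw [pvMinLen_cons] at h
    cases h1 : pvMinLen xs s with
    | none =>
      rw [h1, pvOMin_none_left] at h
      cases h2 : pvMinLen xs (s - x) with
      | none => rw [h2] at h; simp at h
      | some m =>
        rw [h2] at h; simp at h
        rcases ih (s - x) m h2 with ⟨l, hl, hlen, hsum⟩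
        exact ⟨x :: l, List.cons_sublist_cons.mpr hl,
          by simp only [List.length_cons, hlen]; omega,
          by simp only [List.sum_cons, hsum]; omega⟩
    | some a =>
      rw [h1] at h
      cases h2 : pvMinLen xs (s - x) with
      | none =>
        rw [h2] at h
        simp [pvOMin] at h
        rcases ih s a h1 with ⟨l, hl, hlen, hsum⟩
        exact ⟨l, hl.trans (List.sublist_cons_self x xs), by omega, hsum⟩
      | some m =>
        rw [h2] at h
        simp [pvOMin] at h
        by_cases hle : a ≤ m + 1
        · rcases ih s a h1 with ⟨l, hl, hlen, hsum⟩
          exact ⟨l, hl.trans (List.sublist_cons_self x xs), by omega, hsum⟩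
        · rcases ih (s - x) m h2 with ⟨l, hl, hlen, hsum⟩
          exact ⟨x :: l, List.cons_sublist_cons.mpr hl,
            by simp only [List.length_cons, hlen]; omega,
            by simp only [List.sum_cons, hsum]; omega⟩

-- (3) minimality: any sublist summing to s has length ≥ the returned value
theorem pvMinLen_le (xs : List Int) : ∀ s l, List.Sublist l xs → l.sum = s →
    ∃ k, pvMinLen xs s = some k ∧ k ≤ l.length := by
  induction xs with
  | nil =>
    intro s l hl hs
    rcases List.sublist_nil.mp hl with rfl
    exact ⟨0, by simp [pvMinLen, ← hs], by simp⟩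
  | cons x xs ih =>
    intro s l hl hs
    rcases List.sublist_cons_iff.mp hl with hl' | ⟨r, rfl, hr⟩
    · rcases ih s l hl' hs with ⟨k, hk, hkle⟩
      have hmin : ∃ m, pvOMin (some k) ((pvMinLen xs (s - x)).map (· + 1)) = some m ∧ m ≤ k := by
        cases h2 : pvMinLen xs (s - x) with
        | none => exact ⟨k, rfl, le_refl k⟩
        | some m => exact ⟨min k (m + 1), rfl, by omega⟩
      rcases hmin with ⟨m, hm, hmk⟩
      exact ⟨m, by rw [pvMinLen_cons, hk]; exact hm, le_trans hmk hkle⟩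
    · have hrs : r.sum = s - x := by simp only [List.sum_cons] at hs; omega
      rcases ih (s - x) r hr hrs with ⟨k, hk, hkle⟩
      have hmin : ∃ m, pvOMin (pvMinLen xs s) ((some k).map (· + 1)) = some m ∧ m ≤ k + 1 := by
        cases h1 : pvMinLen xs s with
        | none => exact ⟨k + 1, rfl, le_refl _⟩
        | some a => exact ⟨min a (k + 1), rfl, by omega⟩
      rcases hmin with ⟨m, hm, hmk⟩
      exact ⟨m, by rw [pvMinLen_cons, hk]; exact hm,
        by simp only [List.length_cons]; omega⟩

-- ----- B-side: the dict fold computes pvMinLen -----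

-- minimum candidate c+1 contributed by snapshot items whose key shifts to t
def pvCand (x t : Int) : List (Int × Int) → Option Int
  | [] => none
  | p :: ps => pvOMinI (if p.1 + x = t then some (p.2 + 1) else none) (pvCand x t ps)

theorem pvCand_cons (x t : Int) (p : Int × Int) (ps : List (Int × Int)) :
    pvCand x t (p :: ps) = pvOMinI (if p.1 + x = t then some (p.2 + 1) else none) (pvCand x t ps) := rfl

theorem pvStep_get? (x : Int) (d : PySem.Dict Int Int) (p : Int × Int) (t : Int) :
    (pvStep x d p).get? t = pvOMinI (d.get? t) (if p.1 + x = t then some (p.2 + 1) else none) := by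
  by_cases ht : p.1 + x = t
  · subst ht
    rw [if_pos rfl]
    unfold pvStep
    cases hg : d.get? (p.1 + x) with
    | none =>
      show (d.insert (p.1 + x) (p.2 + 1)).get? (p.1 + x) = pvOMinI none (some (p.2 + 1))
      rw [PySem.Dict.get?_insert_self, pvOMinI_none_left]
    | some v =>
      show (if v > p.2 + 1 then d.insert (p.1 + x) (p.2 + 1) else d).get? (p.1 + x)
          = pvOMinI (some v) (some (p.2 + 1))
      by_cases hv : p.2 + 1 < v
      · rw [if_pos hv]
        rw [PySem.Dict.get?_insert_self, pvOMinI_some_some, min_eq_right (le_of_lt hv)]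
      · rw [if_neg hv, hg, pvOMinI_some_some, min_eq_left (by omega : v ≤ p.2 + 1)]
  · rw [if_neg ht, pvOMinI_none_right]
    unfold pvStep
    cases hg : d.get? (p.1 + x) with
    | none =>
      show (d.insert (p.1 + x) (p.2 + 1)).get? t = d.get? t
      simp only [PySem.Dict.get?_insert]
      exact if_neg (fun h : t = p.1 + x => ht h.symm)
    | some v =>
      show (if v > p.2 + 1 then d.insert (p.1 + x) (p.2 + 1) else d).get? t = d.get? t
      by_cases hv : p.2 + 1 < v
      · rw [if_pos hv]
        simp only [PySem.Dict.get?_insert]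
        exact if_neg (fun h : t = p.1 + x => ht h.symm)
      · rw [if_neg hv]

theorem pvStep_nodup (x : Int) (d : PySem.Dict Int Int) (p : Int × Int)
    (h : d.keys.Nodup) : (pvStep x d p).keys.Nodup := by
  unfold pvStep
  cases d.get? (p.1 + x) with
  | none => exact PySem.Dict.nodup_keys_insert _ _ _ h
  | some v =>
    show (if v > p.2 + 1 then d.insert (p.1 + x) (p.2 + 1) else d).keys.Nodup
    by_cases hv : p.2 + 1 < v
    · rw [if_pos hv]; exact PySem.Dict.nodup_keys_insert _ _ _ h
    · rw [if_neg hv]; exact h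

theorem pvInner_get? (x t : Int) (items : List (Int × Int)) : ∀ d : PySem.Dict Int Int,
    (items.foldl (pvStep x) d).get? t = pvOMinI (d.get? t) (pvCand x t items) := by
  induction items with
  | nil => intro d; rw [List.foldl_nil, show pvCand x t [] = none from rfl, pvOMinI_none_right]
  | cons p ps ih =>
    intro d
    rw [List.foldl_cons, ih (pvStep x d p), pvStep_get?, pvOMinI_assoc, pvCand_cons]

theorem pvInner_nodup (x : Int) (items : List (Int × Int)) : ∀ d : PySem.Dict Int Int,
    d.keys.Nodup → (items.foldl (pvStep x) d).keys.Nodup := by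
  induction items with
  | nil => intro d h; exact h
  | cons p ps ih => intro d h; exact ih _ (pvStep_nodup x d p h)

theorem pvCand_none (x t : Int) (l : List (Int × Int)) (h : ∀ p ∈ l, p.1 + x ≠ t) :
    pvCand x t l = none := by
  induction l with
  | nil => rfl
  | cons p ps ih =>
    rw [pvCand_cons, if_neg (h p (by simp)), ih (fun q hq => h q (by simp [hq])), pvOMinI_none_left]

theorem pvCand_mk (x t : Int) : ∀ l : List (Int × Int), (l.map Prod.fst).Nodup →
    pvCand x t l = ((PySem.Dict.mk l).get? (t - x)).map (· + 1) := by
  intro l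
  induction l with
  | nil => intro _; rfl
  | cons p ps ih =>
    intro h
    have hn : (ps.map Prod.fst).Nodup := (List.nodup_cons.mp (by simpa using h)).2
    have hp : p.1 ∉ ps.map Prod.fst := (List.nodup_cons.mp (by simpa using h)).1
    rw [pvCand_cons, PySem.Dict.get?_mk_cons]
    by_cases hk : p.1 + x = t
    · have hbeq : (p.1 == t - x) = true := by simp; omega
      have hrest : pvCand x t ps = none :=
        pvCand_none x t ps (fun q hq hqt => hp (List.mem_map.mpr ⟨q, hq, by omega⟩))
      rw [if_pos hk, hrest, pvOMinI_none_right, hbeq]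
      simp
    · have hbeq : (p.1 == t - x) = false := by simp; omega
      rw [if_neg hk, pvOMinI_none_left, hbeq, ih hn]
      simp

theorem pvCand_items (x t : Int) (d : PySem.Dict Int Int) (h : d.keys.Nodup) :
    pvCand x t d.items = (d.get? (t - x)).map (· + 1) := by
  have hfst : d.items.map Prod.fst = d.keys := rfl
  rw [pvCand_mk x t d.items (by rw [hfst]; exact h)]

-- the outer fold invariant
def pvInv (d : PySem.Dict Int Int) (xs : List Int) : Prop :=
  ∀ t, d.get? t = (pvMinLen xs t).map (fun k => (k : Int))

theorem pvInv_step (d : PySem.Dict Int Int) (xs : List Int) (x : Int)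
    (hinv : pvInv d xs) (hnd : d.keys.Nodup) :
    pvInv (d.items.foldl (pvStep x) d) (xs ++ [x]) := by
  intro t
  rw [pvInner_get? x t d.items d, pvCand_items x t d hnd, hinv t, hinv (t - x),
    pvMinLen_snoc xs x t, pvOMin_cast]
  congr 1
  cases pvMinLen xs (t - x) <;> simp

theorem pvOuter (cs : List Int) : ∀ (d : PySem.Dict Int Int) (xs : List Int),
    pvInv d xs → d.keys.Nodup →
    pvInv (cs.foldl (fun d x => d.items.foldl (pvStep x) d) d) (xs ++ cs) := by
  induction cs with
  | nil => intro d xs h _; simpa using h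
  | cons x cs ih =>
    intro d xs h hnd
    have h1 := pvInv_step d xs x h hnd
    have h2 := pvInner_nodup x d.items d hnd
    have := ih _ (xs ++ [x]) h1 h2
    simpa using this

theorem pvAlt_get (containers : List Int) (t : Int) :
    find_min_containers_alt containers t =
      ((pvMinLen containers t).map (fun k => (k : Int))).getD 0 := by
  have hbase : pvInv (PySem.Dict.empty.insert 0 0) [] := by
    intro s
    by_cases hs : s = 0 <;>
      simp [hs, pvMinLen, PySem.Dict.get?_insert, PySem.Dict.get?_empty]
  have hnd : (PySem.Dict.empty.insert 0 0 : PySem.Dict Int Int).keys.Nodup :=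
    PySem.Dict.nodup_keys_insert _ _ _ PySem.Dict.nodup_keys_empty
  have h := pvOuter containers (PySem.Dict.empty.insert 0 0) [] hbase hnd
  rw [List.nil_append] at h
  show (containers.foldl (fun d x => d.items.foldl (pvStep x) d) (PySem.Dict.empty.insert 0 0)).getD t 0 = _
  rw [PySem.Dict.getD_eq_get?_getD, h t]

-- ----- A-side: pvCombos and the loop -----

theorem mem_pvCombos (xs : List Int) : ∀ (k : Nat) (l : List Int),
    l ∈ pvCombos xs k ↔ List.Sublist l xs ∧ l.length = k := by
  induction xs with
  | nil =>
    intro k l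
    cases k with
    | zero =>
      show l ∈ [([] : List Int)] ↔ _
      constructor
      · intro hm
        have hl : l = [] := by simpa using hm
        subst hl; exact ⟨List.Sublist.refl _, rfl⟩
      · rintro ⟨_, hl⟩
        have : l = [] := List.length_eq_zero_iff.mp hl
        subst this; simp
    | succ k =>
      show l ∈ ([] : List (List Int)) ↔ _
      constructor
      · intro hm; simp at hm
      · rintro ⟨hs, hl⟩
        rcases List.sublist_nil.mp hs with rfl
        simp at hl
  | cons x xs ih =>
    intro k l
    cases k with
    | zero =>
      show l ∈ [([] : List Int)] ↔ _
      constructor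
      · intro hm
        have hl : l = [] := by simpa using hm
        subst hl; exact ⟨List.nil_sublist _, rfl⟩
      · rintro ⟨_, hl⟩
        have : l = [] := List.length_eq_zero_iff.mp hl
        subst this; simp
    | succ k =>
      show l ∈ (pvCombos xs k).map (fun c => x :: c) ++ pvCombos xs (k + 1) ↔ _
      rw [List.mem_append, List.mem_map]
      constructor
      · rintro (⟨c, hc, rfl⟩ | h)
        · rcases (ih k c).mp hc with ⟨hs, hlen⟩
          exact ⟨List.cons_sublist_cons.mpr hs, by simp [hlen]⟩
        · rcases (ih (k + 1) l).mp h with ⟨hs, hlen⟩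
          exact ⟨hs.trans (List.sublist_cons_self x xs), hlen⟩
      · rintro ⟨hs, hlen⟩
        rcases List.sublist_cons_iff.mp hs with hs' | ⟨r, rfl, hr⟩
        · exact Or.inr ((ih (k + 1) l).mpr ⟨hs', hlen⟩)
        · exact Or.inl ⟨r, (ih k r).mpr ⟨hr, by simpa using hlen⟩, rfl⟩

theorem pvLoopA_none (cs : List Int) (t : Int) : ∀ (rem i : Nat),
    (∀ j, i ≤ j → j < i + rem → ((pvCombos cs j).any (fun c => c.sum == t)) = false) →
    pvLoopA cs t i rem = 0 := by
  intro rem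
  induction rem with
  | zero => intro i _; rfl
  | succ rem ih =>
    intro i h
    show (if (pvCombos cs i).any (fun c => c.sum == t) then (i : Int) else pvLoopA cs t (i + 1) rem) = 0
    rw [h i (le_refl i) (by omega)]
    simp only [Bool.false_eq_true, if_false]
    exact ih (i + 1) (fun j hj hj' => h j (by omega) (by omega))

theorem pvLoopA_found (cs : List Int) (t : Int) : ∀ (rem i m : Nat),
    i ≤ m → m < i + rem →
    ((pvCombos cs m).any (fun c => c.sum == t)) = true →
    (∀ j, i ≤ j → j < m → ((pvCombos cs j).any (fun c => c.sum == t)) = false) →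
    pvLoopA cs t i rem = (m : Int) := by
  intro rem
  induction rem with
  | zero => intro i m h1 h2; omega
  | succ rem ih =>
    intro i m h1 h2 hm h
    show (if (pvCombos cs i).any (fun c => c.sum == t) then (i : Int) else pvLoopA cs t (i + 1) rem) = m
    rcases eq_or_lt_of_le h1 with rfl | hlt
    · rw [hm]; simp
    · rw [h i (le_refl i) hlt]
      simp only [Bool.false_eq_true, if_false]
      exact ih (i + 1) m (by omega) (by omega) hm (fun j hj hj' => h j (by omega) hj')

-- cond on the sorted list ↔ a sublist of the ORIGINAL list of that length sums to t
theorem pvCond_iff (containers : List Int) (t : Int) (k : Nat) :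
    ((pvCombos (PySem.List.sorted containers (fun x => x) true) k).any (fun c => c.sum == t)) = true ↔
      ∃ l, List.Sublist l containers ∧ l.length = k ∧ l.sum = t := by
  have hperm : List.Perm (PySem.List.sorted containers (fun x => x) true) containers :=
    PySem.List.sorted_perm _ _ _
  rw [List.any_eq_true]
  constructor
  · rintro ⟨c, hc, hsum⟩
    rcases (mem_pvCombos _ k c).mp hc with ⟨hs, hlen⟩
    rcases hs.subperm.trans hperm.subperm with ⟨l, hpl, hl⟩
    exact ⟨l, hl, by rw [hpl.length_eq, hlen], by rw [hpl.sum_eq]; simpa using hsum⟩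
  · rintro ⟨l, hl, hlen, hsum⟩
    rcases hl.subperm.trans hperm.symm.subperm with ⟨c, hpc, hc⟩
    exact ⟨c, (mem_pvCombos _ k c).mpr ⟨hc, by rw [hpc.length_eq, hlen]⟩,
      by simp [hpc.sum_eq, hsum]⟩

-- minimality of pvMinLen against a smaller candidate size
theorem pvNoSmaller (containers : List Int) (t : Int) (m : Nat)
    (h : pvMinLen containers t = some m) :
    ∀ j, j < m → ¬ ∃ l, List.Sublist l containers ∧ l.length = j ∧ l.sum = t := by
  rintro j hj ⟨l, hl, hlen, hsum⟩
  rcases pvMinLen_le containers t l hl hsum with ⟨k, hk, hkle⟩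
  rw [h] at hk
  injection hk with hk
  omega

theorem pvA_eq (containers : List Int) (t : Int) :
    find_min_containers containers t =
      pvLoopA (PySem.List.sorted containers (fun x => x) true) t 0
        (PySem.List.sorted containers (fun x => x) true).length := rfl

theorem pvSorted_length (containers : List Int) :
    (PySem.List.sorted containers (fun x => x) true).length = containers.length :=
  (PySem.List.sorted_perm _ _ _).length_eq

-- ===== VERDICT (by name: the statement is the Claim_ definition above) =====
theorem find_min_containers_spec : Claim_unchanged_find_min_containers := by
  intro containers target _ hnD
  show find_min_containers containers target = find_min_containers_alt containers target
  rw [pvA_eq, pvAlt_get]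
  cases h : pvMinLen containers target with
  | none =>
    refine pvLoopA_none _ target _ 0 (fun j _ hj => ?_)
    rw [← Bool.not_eq_true]
    intro hcond
    rcases (pvCond_iff containers target j).mp hcond with ⟨l, hl, _, hsum⟩
    exact (pvMinLen_eq_none containers target).mp h l hl hsum
  | some m =>
    rcases pvMinLen_eq_some_exists containers target m h with ⟨l, hl, hlen, hsum⟩
    have hmn : m ≤ containers.length := hlen ▸ hl.length_le
    rcases lt_or_eq_of_le hmn with hmlt | hmeq
    · refine pvLoopA_found _ target _ 0 m (by omega)
        (by rw [pvSorted_length]; omega)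
        ((pvCond_iff containers target m).mpr ⟨l, hl, hlen, hsum⟩)
        (fun j _ hj => ?_)
      rw [← Bool.not_eq_true]
      intro hcond
      exact pvNoSmaller containers target m h j hj ((pvCond_iff containers target j).mp hcond)
    · -- m = containers.length: the only solution would be the full list
      cases hcs : containers with
      | nil =>
        subst hcs
        have hsc : (PySem.List.sorted ([] : List Int) (fun x => x) true).length = 0 := by
          rw [pvSorted_length]; rfl
        rw [hsc, hmeq]
        rfl
      | cons y ys =>
        exfalso
        apply hnD
        refine ⟨by simp [hcs], ?_, ?_⟩
        · have hlc : l = containers := hl.eq_of_length (by omega)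
          rw [← hlc]; exact hsum
        · intro l' hl' hlen' hsum'
          exact pvNoSmaller containers target m h l'.length (by omega)
            ⟨l', List.mem_sublists.mp hl', rfl, hsum'⟩

theorem find_min_containers_changed : Claim_changed_find_min_containers := by
  unfold Claim_changed_find_min_containers; decide

theorem find_min_containers_tight : Claim_exact_find_min_containers := by
  intro containers target _ hD
  rcases hD with ⟨hne, hsum, hproper⟩
  have hn : 0 < containers.length := by
    cases containers with
    | nil => exact absurd rfl hne
    | cons a l => simp
  have hA : find_min_containers containers target = 0 := by
    rw [pvA_eq]
    refine pvLoopA_none _ target _ 0 (fun j _ hj => ?_)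
    rw [← Bool.not_eq_true]
    intro hcond
    rcases (pvCond_iff containers target j).mp hcond with ⟨l, hl, hlen, hsuml⟩
    have hjlt : l.length < containers.length := by
      rw [pvSorted_length] at hj
      omega
    exact hproper l (List.mem_sublists.mpr hl) hjlt hsuml
  have hB : find_min_containers_alt containers target = (containers.length : Int) := by
    rw [pvAlt_get]
    rcases pvMinLen_le containers target containers (List.Sublist.refl _) hsum with ⟨k, hk, hkle⟩
    have hkge : containers.length ≤ k := by
      by_contra hklt
      rcases pvMinLen_eq_some_exists containers target k hk with ⟨l, hl, hlen, hsuml⟩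
      exact hproper l (List.mem_sublists.mpr hl) (by omega) hsuml
    have hkn : k = containers.length := by omega
    rw [hk, hkn]
    rfl
  rw [hA, hB]
  intro hcontra
  omega
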